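-- pv_equiv track=rewrite | github.com/jecalles/synbio | synbio/codes/utils.py | is_one_to_one
-- ===== SOURCE A (Python) =====
-- def is_one_to_one(table):
--     """A staticmethod that takes a codon table as a dictionary and returns
--         True if it represents a One-To-One genetic code and False otherwise.
--
--         A one-to-one code is defined as a code in which every amino acid is
--         represented with exactly one codon. This defines an unambiguous
--         mapping of protein sequence to corresponding DNA sequence.
--
--     Parameters
--     ----------
--     dict table: a python dict representing the codon table
--
--     Returns
--     -------
--     bool one2one: boolean; True if One-To-One, and False otherwise
--     """
--     # declare storage dict to count amino acid number
--     aa_set = set(aa for aa in table.values())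
--     aa_counts = {aa: 0 for aa in aa_set}
--     # count number of amino acids
--     for aa in table.values():
--         aa_counts[aa] += 1
--     # iterate through dictionary and check counts
--     one2one = True
--     for aa, count in aa_counts.items():
--         # skip stop and null signals:
--         if aa in {'*', '0'}:
--             continue
--         elif count > 1:
--             one2one = False
--             break
--     return one2one
-- ===== SOURCE B (Python) =====
-- def is_one_to_one(table):
--     amino_acids = [aa for aa in table.values() if aa not in {'*', '0'}]
--     return len(amino_acids) == len(set(amino_acids))
-- ===== Notes on version B (the rewrite author's own statement) =====
-- stated objective: simpler
-- what changed: Replaced A's two-pass tally (build a per-amino-acid count dict, then scan counts with an early break) by a single filtered comprehension whose length is compared with the length of its set, so no count dict and no check loop remain.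
import Mathlib
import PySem

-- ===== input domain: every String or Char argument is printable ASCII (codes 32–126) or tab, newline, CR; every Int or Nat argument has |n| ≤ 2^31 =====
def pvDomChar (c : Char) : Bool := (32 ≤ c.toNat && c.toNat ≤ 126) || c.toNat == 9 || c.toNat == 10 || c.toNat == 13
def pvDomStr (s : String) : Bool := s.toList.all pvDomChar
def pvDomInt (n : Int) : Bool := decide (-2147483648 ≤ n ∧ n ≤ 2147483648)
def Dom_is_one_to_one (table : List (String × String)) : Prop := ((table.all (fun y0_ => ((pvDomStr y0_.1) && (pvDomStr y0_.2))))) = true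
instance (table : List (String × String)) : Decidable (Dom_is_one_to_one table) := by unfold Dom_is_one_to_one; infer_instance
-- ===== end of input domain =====

-- B replaces A's tally-dict-then-scan with one filtered list compared against its set (simpler, same cost).

-- ===== PORT A =====
-- the check loop over aa_counts.items() (with its early break)
def isOneCheck : List (String × Int) → Bool
  | [] => true
  | (aa, count) :: rest =>
      if aa = "*" ∨ aa = "0" then isOneCheck rest
      else if count > 1 then false
      else isOneCheck rest

def is_one_to_one (table : List (String × String)) : Bool :=
  let d := PySem.Dict.ofList table
  let aaSet := PySem.Set.ofList d.values
  let aaCounts0 := aaSet.foldl (fun acc aa => acc.insert aa (0 : Int)) PySem.Dict.empty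
  let aaCounts := d.values.foldl (fun acc aa => acc.modify aa 0 (· + 1)) aaCounts0
  isOneCheck aaCounts.items

-- ===== PORT B =====
def is_one_to_one_alt (table : List (String × String)) : Bool :=
  let aminoAcids := (PySem.Dict.ofList table).values.filter (fun aa => !(aa == "*" || aa == "0"))
  aminoAcids.length == (PySem.Set.ofList aminoAcids).length

-- ===== PRECONDITION & SPEC =====
def Spec_is_one_to_one (table : List (String × String)) (out : Bool) : Prop := out = is_one_to_one_alt table
instance (table : List (String × String)) (out : Bool) : Decidable (Spec_is_one_to_one table out) := by unfold Spec_is_one_to_one; infer_instance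

-- ===== CLAIM (what is proved, stated in full; the proofs are below) =====
def Claim_equal_is_one_to_one : Prop := ∀ (table : List (String × String)), Dom_is_one_to_one table → Spec_is_one_to_one table (is_one_to_one table)

-- ===== LEMMAS AND PROOFS =====

-- A's check loop (break included) is an `all` over the items.
theorem isOneCheck_eq_all (items : List (String × Int)) :
    isOneCheck items = items.all (fun p => (p.1 == "*" || p.1 == "0") || decide (p.2 ≤ 1)) := by
  induction items with
  | nil => rfl
  | cons p rest ih =>
    obtain ⟨aa, c⟩ := p
    by_cases h : aa = "*" ∨ aa = "0"
    · rcases h with h | h <;> simp [isOneCheck, h, ih]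
    · have h1 : aa ≠ "*" ∧ aa ≠ "0" := by tauto
      by_cases hc : c > 1
      · have hfalse : (aa == "*" || aa == "0" || decide (c ≤ 1)) = false := by
          simp [h1.1, h1.2]; omega
        simp [isOneCheck, if_neg h, if_pos hc, hfalse]
      · simp [isOneCheck, if_neg h, if_neg hc, ih, (by omega : c ≤ 1)]

-- the tally loop never changes the key list when every key is already present
theorem keys_tally (l : List String) (d : PySem.Dict String Int)
    (h : ∀ a ∈ l, a ∈ d.keys) :
    (l.foldl (fun acc aa => acc.modify aa 0 (· + 1)) d).keys = d.keys := by
  induction l generalizing d with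
  | nil => rfl
  | cons a l ih =>
    have hc : d.contains a = true :=
      (PySem.Dict.contains_iff_mem_keys d a).2 (h a (by simp))
    have hk : (d.modify a 0 (· + 1)).keys = d.keys := by
      rw [PySem.Dict.keys_modify, PySem.Dict.keys_insert_of_contains _ _ hc]
    simp only [List.foldl_cons]
    rw [ih _ (by intro x hx; rw [hk]; exact h x (by simp [hx]))]
    exact hk

-- length of the dedup equals the length iff the list has no duplicates
theorem ofList_length_eq_iff (xs : List String) :
    ((PySem.Set.ofList xs).length = xs.length) ↔ xs.Nodup := by
  constructor
  · intro h
    have h1 : (PySem.Set.ofList xs).toFinset = xs.toFinset := by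
      ext a; simp [PySem.Set.mem_ofList]
    have h2 : (PySem.Set.ofList xs).length = (PySem.Set.ofList xs).toFinset.card :=
      (List.toFinset_card_of_nodup (PySem.Set.nodup_ofList xs)).symm
    have h3 : xs.toFinset.card = xs.dedup.length := List.card_toFinset xs
    have h1x : (PySem.Set.ofList xs).toFinset.card = xs.toFinset.card := by rw [h1]
    have h4 : xs.dedup = xs :=
      (List.dedup_sublist xs).eq_of_length (by omega)
    exact List.dedup_eq_self.mp h4
  · intro h
    rw [PySem.Set.ofList_eq_self_of_nodup _ h]

-- core equivalence, over an arbitrary value list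
theorem core_eq (vals : List String) :
    (isOneCheck ((vals.foldl (fun acc aa => acc.modify aa 0 (· + 1))
        ((PySem.Set.ofList vals).foldl (fun acc aa => acc.insert aa (0 : Int)) PySem.Dict.empty)).items))
      = ((vals.filter (fun aa => !(aa == "*" || aa == "0"))).length
          == (PySem.Set.ofList (vals.filter (fun aa => !(aa == "*" || aa == "0")))).length) := by
  set aaSet := PySem.Set.ofList vals with hset
  set d0 := aaSet.foldl (fun acc aa => acc.insert aa (0 : Int)) PySem.Dict.empty with hd0
  set d1 := vals.foldl (fun acc aa => acc.modify aa 0 (· + 1)) d0 with hd1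
  set filtered := vals.filter (fun aa => !(aa == "*" || aa == "0")) with hfil
  -- items of the zero dict
  have hnd : aaSet.Nodup := PySem.Set.nodup_ofList vals
  have hitems0 : d0.items = aaSet.map (fun aa => (aa, (0 : Int))) := by
    rw [hd0]
    have := PySem.Dict.items_foldl_insert_fresh (ν := Int) aaSet (fun aa => aa)
      (fun _ => (0 : Int)) PySem.Dict.empty (by intro a _; rfl) (by simpa using hnd)
    simpa using this
  have hkeys0 : d0.keys = aaSet := by
    simp [PySem.Dict.keys, hitems0, List.map_map, Function.comp_def]
  have hkeys1 : d1.keys = aaSet := by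
    rw [hd1, keys_tally vals d0 (by intro a ha; rw [hkeys0]; exact (PySem.Set.mem_ofList vals a).2 ha)]
    exact hkeys0
  have hnd1 : d1.keys.Nodup := by rw [hkeys1]; exact hnd
  -- getD of the tallied dict
  have hgetD : ∀ aa, d1.getD aa 0 = d0.getD aa 0 + (vals.count aa : Int) := by
    intro aa; rw [hd1]; exact PySem.Dict.getD_foldl_modify_add_one vals d0 aa
  have hgetD0 : ∀ aa ∈ aaSet, d0.getD aa 0 = 0 := by
    intro aa ha
    exact PySem.Dict.getD_of_mem_items (d := d0) (by rw [hitems0]; exact List.mem_map_of_mem ha)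
      (by rw [hkeys0]; exact hnd) 0
  have hitems1 : d1.items = aaSet.map (fun aa => (aa, (vals.count aa : Int))) := by
    rw [PySem.Dict.items_eq_map_keys d1 hnd1 0, hkeys1]
    apply List.map_congr_left
    intro aa ha
    rw [hgetD aa, hgetD0 aa ha]
    simp
  rw [hitems1, isOneCheck_eq_all]
  -- both sides as decidable propositions
  have hB : (filtered.length == (PySem.Set.ofList filtered).length) = decide filtered.Nodup := by
    by_cases h : filtered.Nodup
    · simp [h, (ofList_length_eq_iff filtered).2 h]
    · simp [h]
      intro hlen
      exact h ((ofList_length_eq_iff filtered).1 hlen.symm)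
  rw [hB]
  rw [Bool.eq_iff_iff]
  simp only [List.all_map, List.all_eq_true, Function.comp_apply, decide_eq_true_eq,
    Bool.or_eq_true, beq_iff_eq]
  constructor
  · intro h
    rw [List.nodup_iff_count_le_one]
    intro a
    by_cases hs : a = "*" ∨ a = "0"
    · have : a ∉ filtered := by
        rw [hfil]; intro hmem
        rcases List.mem_filter.1 hmem with ⟨_, hp⟩
        rcases hs with h' | h' <;> simp [h'] at hp
      simp [List.count_eq_zero.2 this]
    · push_neg at hs
      have hcf : filtered.count a = vals.count a := by
        rw [hfil]; exact List.count_filter (by simp [hs.1, hs.2])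
      rw [hcf]
      by_cases hm : a ∈ vals
      · rcases h a ((PySem.Set.mem_ofList vals a).2 hm) with h' | h'
        · exact absurd h' (by tauto)
        · omega
      · simp [List.count_eq_zero.2 hm]
  · intro h aa ha
    by_cases hs : aa = "*" ∨ aa = "0"
    · left; exact hs
    · right
      push_neg at hs
      have hcf : filtered.count aa = vals.count aa := by
        rw [hfil]; exact List.count_filter (by simp [hs.1, hs.2])
      have := (List.nodup_iff_count_le_one.1 h) aa
      omega

-- ===== VERDICT (by name: the statement is the Claim_ definition above) =====
theorem is_one_to_one_spec : Claim_equal_is_one_to_one := by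
  intro table _
  unfold Spec_is_one_to_one is_one_to_one is_one_to_one_alt
  exact core_eq (PySem.Dict.ofList table).values
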